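-- pv_equiv track=rewrite | github.com/SoyBison/computational_rupahistory | rupahistory.py | hex_rotations
-- ===== SOURCE A (Python) =====
-- def hex_left(c):
--     return (-c[1], -c[2], -c[0])
--
-- def hex_rotations(c):
--     out = [c]
--     last = c
--     for _ in range(5):
--         new = hex_left(last)
--         out.append(new)
--         last = new
--     return out
-- ===== SOURCE B (Python) =====
-- def hex_rotations(c):
--     return [c,
--             (-c[1], -c[2], -c[0]),
--             (c[2], c[0], c[1]),
--             (-c[0], -c[1], -c[2]),
--             (c[1], c[2], c[0]),
--             (-c[2], -c[0], -c[1])]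
-- ===== Notes on version B (the rewrite author's own statement) =====
-- stated objective: simpler
-- what changed: Replaced the 5-iteration loop with accumulator by a single list literal giving the closed form of all six rotations of c.
import Mathlib
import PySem

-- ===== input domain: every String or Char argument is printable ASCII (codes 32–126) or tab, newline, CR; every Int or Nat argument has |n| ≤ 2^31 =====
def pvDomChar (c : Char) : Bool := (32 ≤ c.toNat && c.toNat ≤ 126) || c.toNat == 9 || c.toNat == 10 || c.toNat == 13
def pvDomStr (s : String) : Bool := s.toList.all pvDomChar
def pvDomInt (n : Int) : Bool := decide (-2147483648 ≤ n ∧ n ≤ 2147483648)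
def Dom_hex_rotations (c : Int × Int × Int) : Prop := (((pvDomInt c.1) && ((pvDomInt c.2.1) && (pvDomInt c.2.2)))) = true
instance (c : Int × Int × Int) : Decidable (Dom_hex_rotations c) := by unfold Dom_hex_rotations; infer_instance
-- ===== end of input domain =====

-- B replaces A's 5-iteration rotate-and-append loop by one closed-form list literal (simpler).

-- ===== PORT A =====
def hex_left (c : Int × Int × Int) : Int × Int × Int := (-c.2.1, -c.2.2, -c.1)

def hex_rotations (c : Int × Int × Int) : List (Int × Int × Int) :=
  let st := (List.range 5).foldl
    (fun (s : List (Int × Int × Int) × (Int × Int × Int)) _ =>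
      let new := hex_left s.2
      (s.1 ++ [new], new))
    ([c], c)
  st.1

-- ===== PORT B =====
def hex_rotations_alt (c : Int × Int × Int) : List (Int × Int × Int) :=
  [c,
   (-c.2.1, -c.2.2, -c.1),
   (c.2.2, c.1, c.2.1),
   (-c.1, -c.2.1, -c.2.2),
   (c.2.1, c.2.2, c.1),
   (-c.2.2, -c.1, -c.2.1)]

-- ===== PRECONDITION & SPEC =====
def Spec_hex_rotations (c : Int × Int × Int) (out : List (Int × Int × Int)) : Prop := out = hex_rotations_alt c
instance (c : Int × Int × Int) (out : List (Int × Int × Int)) : Decidable (Spec_hex_rotations c out) := by unfold Spec_hex_rotations; infer_instance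

-- ===== CLAIM (what is proved, stated in full; the proofs are below) =====
def Claim_equal_hex_rotations : Prop := ∀ (c : Int × Int × Int), Dom_hex_rotations c → Spec_hex_rotations c (hex_rotations c)

-- ===== LEMMAS AND PROOFS =====

-- ===== VERDICT (by name: the statement is the Claim_ definition above) =====
theorem hex_rotations_spec : Claim_equal_hex_rotations := by
  intro ⟨a, b, c⟩ _
  show _ = _
  simp [hex_rotations, hex_rotations_alt, hex_left, List.range_succ]
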